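-- pv_equiv track=rewrite | github.com/tannerbyers/decouple-dev-ai-assistant | src/mock_chat_handler.py | _summarize_tasks
-- ===== SOURCE A (Python) =====
-- from typing import Dict, Any, List, Optional
--
-- def _summarize_tasks(tasks: List[Dict[str, Any]]) -> str:
--     """Create a conversational summary of tasks"""
--     count = len(tasks)
--
--     # Count by priority if available
--     high_priority = sum(1 for task in tasks if task.get("priority") == "High")
--     medium_priority = sum(1 for task in tasks if task.get("priority") == "Medium")
--     low_priority = sum(1 for task in tasks if task.get("priority") == "Low")
--
--     summary = f"Found {count} tasks. "
--
--     if high_priority > 0: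
--         summary += f"{high_priority} are high priority. "
--     if medium_priority > 0:
--         summary += f"{medium_priority} are medium priority. "
--     if low_priority > 0:
--         summary += f"{low_priority} are low priority."
--
--     return summary.strip()
-- ===== SOURCE B (Python) =====
-- def _summarize_tasks(tasks):
--     """Create a conversational summary of tasks"""
--     counts = {}
--     for task in tasks:
--         p = task.get("priority")
--         counts[p] = counts.get(p, 0) + 1
--     parts = [f"Found {len(tasks)} tasks."]
--     if counts.get("High", 0) > 0:
--         parts.append(f"{counts['High']} are high priority.")
--     if counts.get("Medium", 0) > 0:
--         parts.append(f"{counts['Medium']} are medium priority.")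
--     if counts.get("Low", 0) > 0:
--         parts.append(f"{counts['Low']} are low priority.")
--     return " ".join(parts)
-- ===== Notes on version B (the rewrite author's own statement) =====
-- stated objective: alternative
-- what changed: B replaces A's three separate filtered scans over the task list with one pass that builds a priority frequency table, and builds the summary by joining sentence parts with ' ' instead of appending with trailing spaces and stripping.
import Mathlib
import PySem

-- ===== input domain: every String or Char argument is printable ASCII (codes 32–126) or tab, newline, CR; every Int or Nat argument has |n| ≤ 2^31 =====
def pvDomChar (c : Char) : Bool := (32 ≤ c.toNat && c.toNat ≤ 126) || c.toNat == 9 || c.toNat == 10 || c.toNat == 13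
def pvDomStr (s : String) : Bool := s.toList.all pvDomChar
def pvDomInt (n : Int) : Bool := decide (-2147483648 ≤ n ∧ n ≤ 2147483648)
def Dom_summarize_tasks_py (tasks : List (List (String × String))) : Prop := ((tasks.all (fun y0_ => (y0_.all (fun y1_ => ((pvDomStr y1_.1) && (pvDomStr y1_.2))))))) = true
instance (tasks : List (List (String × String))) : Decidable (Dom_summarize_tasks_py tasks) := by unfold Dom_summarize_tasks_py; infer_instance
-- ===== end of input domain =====

-- B builds one frequency table over task.get("priority") in a single pass and joins sentence parts with " ",
-- instead of A's three separate filtered scans and append-then-strip; objective: alternative decomposition.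

-- ===== PORT A =====
-- task.get("priority") on a dict
def pvGetPriority (t : List (String × String)) : Option String :=
  (PySem.Dict.mk t).get? "priority"

def summarize_tasks_py (tasks : List (List (String × String))) : String :=
  let count : Int := tasks.length
  let high_priority : Int :=
    tasks.foldl (fun acc task => if pvGetPriority task == some "High" then acc + 1 else acc) 0
  let medium_priority : Int :=
    tasks.foldl (fun acc task => if pvGetPriority task == some "Medium" then acc + 1 else acc) 0
  let low_priority : Int :=
    tasks.foldl (fun acc task => if pvGetPriority task == some "Low" then acc + 1 else acc) 0
  let summary := "Found " ++ PySem.Int.toStr count ++ " tasks. "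
  let summary := if high_priority > 0 then summary ++ PySem.Int.toStr high_priority ++ " are high priority. " else summary
  let summary := if medium_priority > 0 then summary ++ PySem.Int.toStr medium_priority ++ " are medium priority. " else summary
  let summary := if low_priority > 0 then summary ++ PySem.Int.toStr low_priority ++ " are low priority." else summary
  PySem.Str.strip summary

-- ===== PORT B =====
def summarize_tasks_py_alt (tasks : List (List (String × String))) : String :=
  let counts : PySem.Dict (Option String) Int :=
    tasks.foldl (fun d task =>
      let p := (PySem.Dict.mk task).get? "priority"
      d.insert p (d.getD p 0 + 1)) PySem.Dict.empty
  let parts : List String := ["Found " ++ PySem.Int.toStr (tasks.length : Int) ++ " tasks."]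
  let parts := if counts.getD (some "High") 0 > 0 then parts ++ [PySem.Int.toStr (counts.getD (some "High") 0) ++ " are high priority."] else parts
  let parts := if counts.getD (some "Medium") 0 > 0 then parts ++ [PySem.Int.toStr (counts.getD (some "Medium") 0) ++ " are medium priority."] else parts
  let parts := if counts.getD (some "Low") 0 > 0 then parts ++ [PySem.Int.toStr (counts.getD (some "Low") 0) ++ " are low priority."] else parts
  PySem.Str.join " " parts

-- ===== PRECONDITION & SPEC =====
def Spec_summarize_tasks_py (tasks : List (List (String × String))) (out : String) : Prop := out = summarize_tasks_py_alt tasks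
instance (tasks : List (List (String × String))) (out : String) : Decidable (Spec_summarize_tasks_py tasks out) := by unfold Spec_summarize_tasks_py; infer_instance

-- ===== CLAIM (what is proved, stated in full; the proofs are below) =====
def Claim_equal_summarize_tasks_py : Prop := ∀ (tasks : List (List (String × String))), Dom_summarize_tasks_py tasks → Spec_summarize_tasks_py tasks (summarize_tasks_py tasks)

-- ===== LEMMAS AND PROOFS =====

theorem pv_lstrip_eq_self (l : List Char) (ch : Char) (h : l.head? = some ch)
    (hch : PySem.Chars.isspace ch = false) : PySem.Chars.lstrip l = l := by
  cases l with
  | nil => simp at h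
  | cons a t =>
    simp only [List.head?_cons, Option.some.injEq] at h
    subst h
    simp [PySem.Chars.lstrip, hch]

theorem pv_rstrip_append (a b : List Char)
    (h : (List.dropWhile PySem.Chars.isspace b.reverse) ≠ []) :
    PySem.Chars.rstrip (a ++ b) = a ++ PySem.Chars.rstrip b := by
  simp only [PySem.Chars.rstrip, List.reverse_append, List.dropWhile_append]
  simp [List.isEmpty_iff, h]

theorem pv_foldl_count (tasks : List (List (String × String))) (v : String) (acc : Int) :
    tasks.foldl (fun acc task => if pvGetPriority task == some v then acc + 1 else acc) acc
      = acc + ((tasks.map pvGetPriority).count (some v) : Int) := by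
  induction tasks generalizing acc with
  | nil => simp
  | cons t ts ih =>
    simp only [List.foldl_cons, List.map_cons, List.count_cons, ih]
    by_cases h : pvGetPriority t = some v
    · simp only [h, beq_self_eq_true, if_true]
      push_cast
      ring
    · have h2 : ¬ some v = pvGetPriority t := fun hh => h hh.symm
      simp only [beq_iff_eq, h, if_false]
      simp

theorem pv_count_eq (tasks : List (List (String × String))) (v : String) :
    tasks.foldl (fun acc task => if pvGetPriority task == some v then acc + 1 else acc) (0 : Int)
      = (PySem.Dict.counter (tasks.map pvGetPriority)).getD (some v) 0 := by
  rw [PySem.Dict.getD_counter, pv_foldl_count]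
  simp

theorem pv_counts_eq (tasks : List (List (String × String))) :
    tasks.foldl (fun d task =>
      let p := (PySem.Dict.mk task).get? "priority"
      d.insert p (d.getD p 0 + 1)) PySem.Dict.empty
      = PySem.Dict.counter (tasks.map pvGetPriority) := by
  rw [← PySem.Dict.foldl_insert_getD_add_one_eq_counter, List.foldl_map]
  rfl

theorem pv_strlist_inj (s t : String) (h : s.toList = t.toList) : s = t := by
  have := congrArg String.ofList h
  simpa using this

theorem pv_strip_join (c h m l : Int) :
    PySem.Str.strip
      (let s := "Found " ++ PySem.Int.toStr c ++ " tasks. "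
       let s := if h > 0 then s ++ PySem.Int.toStr h ++ " are high priority. " else s
       let s := if m > 0 then s ++ PySem.Int.toStr m ++ " are medium priority. " else s
       if l > 0 then s ++ PySem.Int.toStr l ++ " are low priority." else s)
    = PySem.Str.join " "
      (let p := ["Found " ++ PySem.Int.toStr c ++ " tasks."]
       let p := if h > 0 then p ++ [PySem.Int.toStr h ++ " are high priority."] else p
       let p := if m > 0 then p ++ [PySem.Int.toStr m ++ " are medium priority."] else p
       if l > 0 then p ++ [PySem.Int.toStr l ++ " are low priority."] else p) := by
  apply pv_strlist_inj
  split_ifs <;>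
  · simp only [PySem.Str.toList_strip, PySem.Str.toList_join, String.toList_append,
      List.map_cons, List.map_nil, List.map_append]
    unfold PySem.Chars.strip
    rw [pv_lstrip_eq_self _ 'F' (by simp) (by decide)]
    rw [pv_rstrip_append _ _ (by decide)]
    simp only [show PySem.Chars.rstrip " are low priority.".toList = " are low priority.".toList from by decide,
      show PySem.Chars.rstrip " are medium priority. ".toList = " are medium priority.".toList from by decide,
      show PySem.Chars.rstrip " are high priority. ".toList = " are high priority.".toList from by decide,
      show PySem.Chars.rstrip " tasks. ".toList = " tasks.".toList from by decide]
    simp [PySem.Chars.join, List.intercalate]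

-- ===== VERDICT (by name: the statement is the Claim_ definition above) =====
theorem summarize_tasks_py_spec : Claim_equal_summarize_tasks_py := by
  intro tasks _
  unfold Spec_summarize_tasks_py summarize_tasks_py summarize_tasks_py_alt
  simp only [pv_count_eq, pv_counts_eq]
  exact pv_strip_join _ _ _ _
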